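-- pv_equiv track=rewrite | github.com/Sachaa-Thanasius/pycc | src/pycc/lexer.py | _replace_line_continuations
-- ===== SOURCE A (Python) =====
-- def _replace_line_continuations(source: str, /) -> str:
--     """Remove line continuations while keeping logical and physical line numbers synced via extra newlines."""
--
--     line_continuation_count = 0
--     fixed_lines: list[str] = []
--
--     for line in source.splitlines(keepends=True):
--         if line.endswith("\\\n"):
--             # Discard the line continuation characters.
--             fixed_lines.append(line.removesuffix("\\\n"))
--             line_continuation_count += 1
--
--         else:
--             fixed_lines.append(line)
--
--             if line_continuation_count:
--                 # Pad with newlines to match the number of line continuations so far.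
--                 fixed_lines.append("\n" * line_continuation_count)
--                 line_continuation_count = 0
--
--     return "".join(fixed_lines)
-- ===== SOURCE B (Python) =====
-- def _replace_line_continuations(source: str, /) -> str:
--     """Single character-level scan: no splitlines, no per-line suffix checks."""
--     out: list[str] = []
--     pending = 0
--     midline = False
--     i = 0
--     n = len(source)
--     while i < n:
--         c = source[i]
--         if c == "\\" and i + 1 < n and source[i + 1] == "\n":
--             pending += 1
--             midline = False
--             i += 2
--         elif c == "\r" and i + 1 < n and source[i + 1] == "\n":
--             out.append("\r\n")
--             out.append("\n" * pending)
--             pending = 0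
--             midline = False
--             i += 2
--         elif c == "\n" or c == "\r":
--             out.append(c)
--             out.append("\n" * pending)
--             pending = 0
--             midline = False
--             i += 1
--         else:
--             out.append(c)
--             midline = True
--             i += 1
--     if midline and pending:
--         out.append("\n" * pending)
--     return "".join(out)
-- ===== Notes on version B (the rewrite author's own statement) =====
-- stated objective: alternative
-- what changed: Replaces splitlines(keepends=True) + per-line endswith/removesuffix processing with a single character-level scan that recognises backslash-newline pairs and line terminators directly, flushing the newline padding inline.
import Mathlib
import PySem

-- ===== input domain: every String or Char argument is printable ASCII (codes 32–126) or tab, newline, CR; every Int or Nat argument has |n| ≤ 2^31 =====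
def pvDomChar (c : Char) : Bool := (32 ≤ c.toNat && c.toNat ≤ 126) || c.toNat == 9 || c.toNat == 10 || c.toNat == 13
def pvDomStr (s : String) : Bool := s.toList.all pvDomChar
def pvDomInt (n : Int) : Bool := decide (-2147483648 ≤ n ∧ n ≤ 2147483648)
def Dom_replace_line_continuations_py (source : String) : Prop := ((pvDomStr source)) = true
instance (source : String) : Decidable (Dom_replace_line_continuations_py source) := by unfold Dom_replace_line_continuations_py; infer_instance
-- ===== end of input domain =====

-- B replaces A's splitlines(keepends=True) + per-line endswith/removesuffix processing by a
-- single character-level scan (alternative decomposition, same asymptotic cost).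

-- ===== PORT A =====

def pySplitlinesKeep : List Char → List Char → List (List Char)
  | [], cur => if cur = [] then [] else [cur.reverse]
  | '\r' :: '\n' :: rest, cur => (cur.reverse ++ ['\r', '\n']) :: pySplitlinesKeep rest []
  | '\r' :: rest, cur => (cur.reverse ++ ['\r']) :: pySplitlinesKeep rest []
  | '\n' :: rest, cur => (cur.reverse ++ ['\n']) :: pySplitlinesKeep rest []
  | c :: rest, cur => pySplitlinesKeep rest (c :: cur)

def pyRemovesuffixBN (l : List Char) : List Char :=
  if PySem.Chars.endswith l ['\\', '\n'] then l.dropLast.dropLast else l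

def replace_line_continuations_py (source : String) : String :=
  let r := (pySplitlinesKeep source.toList []).foldl
    (fun (st : Nat × List (List Char)) line =>
      if PySem.Chars.endswith line ['\\', '\n'] then
        (st.1 + 1, st.2 ++ [pyRemovesuffixBN line])
      else
        (0, (st.2 ++ [line]) ++ (if st.1 ≠ 0 then [List.replicate st.1 '\n'] else [])))
    ((0 : Nat), ([] : List (List Char)))
  String.mk (PySem.Chars.join [] r.2)

-- ===== PORT B =====

-- B's while-loop scan: pending = number of continuations removed so far, midline = a character
-- was emitted since the last continuation/terminator (controls the end-of-input flush)
def altGo : List Char → Nat → Bool → List Char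
  | [], p, mid => if mid && p ≠ 0 then List.replicate p '\n' else []
  | '\\' :: '\n' :: rest, p, _ => altGo rest (p + 1) false
  | '\r' :: '\n' :: rest, p, _ =>
      '\r' :: '\n' :: ((if p ≠ 0 then List.replicate p '\n' else []) ++ altGo rest 0 false)
  | '\r' :: rest, p, _ =>
      '\r' :: ((if p ≠ 0 then List.replicate p '\n' else []) ++ altGo rest 0 false)
  | '\n' :: rest, p, _ =>
      '\n' :: ((if p ≠ 0 then List.replicate p '\n' else []) ++ altGo rest 0 false)
  | c :: rest, p, _ => c :: altGo rest p true

def replace_line_continuations_py_alt (source : String) : String :=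
  String.mk (altGo source.toList 0 false)

-- ===== PRECONDITION & SPEC =====
def Spec_replace_line_continuations_py (source : String) (out : String) : Prop := out = replace_line_continuations_py_alt source
instance (source : String) (out : String) : Decidable (Spec_replace_line_continuations_py source out) := by unfold Spec_replace_line_continuations_py; infer_instance

-- ===== CLAIM (what is proved, stated in full; the proofs are below) =====
def Claim_equal_replace_line_continuations_py : Prop := ∀ (source : String), Dom_replace_line_continuations_py source → Spec_replace_line_continuations_py source (replace_line_continuations_py source)

-- ===== LEMMAS AND PROOFS =====

def runA : List (List Char) → Nat → List Char
  | [], _ => []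
  | l :: ls, p =>
      if PySem.Chars.endswith l ['\\', '\n'] then
        pyRemovesuffixBN l ++ runA ls (p + 1)
      else
        l ++ (if p ≠ 0 then List.replicate p '\n' else []) ++ runA ls 0

theorem join_nil_eq_flatten (l : List (List Char)) : PySem.Chars.join [] l = l.flatten := by
  induction l with
  | nil => rfl
  | cons a l ih =>
    cases l with
    | nil => simp [PySem.Chars.join_singleton]
    | cons b l => rw [PySem.Chars.join_cons_cons, ih]; simp

theorem foldA_eq_runA (lines : List (List Char)) (p : Nat) (acc : List (List Char)) :
    (lines.foldl
      (fun (st : Nat × List (List Char)) line =>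
        if PySem.Chars.endswith line ['\\', '\n'] then
          (st.1 + 1, st.2 ++ [pyRemovesuffixBN line])
        else
          (0, (st.2 ++ [line]) ++ (if st.1 ≠ 0 then [List.replicate st.1 '\n'] else [])))
      (p, acc)).2.flatten = acc.flatten ++ runA lines p := by
  induction lines generalizing p acc with
  | nil => simp [runA]
  | cons l ls ih =>
    rw [List.foldl_cons]
    by_cases h : PySem.Chars.endswith l ['\\', '\n'] = true
    · rw [if_pos h, ih, runA, if_pos h]
      simp
    · rw [if_neg h, ih, runA, if_neg h]
      by_cases hp : p = 0 <;> simp [hp]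

theorem endswith_no_nl (l : List Char) (h : '\n' ∉ l) :
    PySem.Chars.endswith l ['\\', '\n'] = false := by
  rw [← Bool.not_eq_true, PySem.Chars.endswith_iff]
  intro hs
  exact h (hs.subset (by simp))

theorem endswith_rn_false (xs : List Char) :
    PySem.Chars.endswith (xs ++ ['\r', '\n']) ['\\', '\n'] = false := by
  rw [← Bool.not_eq_true, PySem.Chars.endswith_iff]
  intro h
  have h2 : ['\r', '\n'] <:+ xs ++ ['\r', '\n'] := List.suffix_append _ _
  have h3 := List.suffix_of_suffix_length_le h h2 (by simp)
  have h4 := h3.eq_of_length (by simp)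
  simp at h4

theorem endswith_nl_false (xs : List Char) (h : xs.getLast? ≠ some '\\') :
    PySem.Chars.endswith (xs ++ ['\n']) ['\\', '\n'] = false := by
  rw [← Bool.not_eq_true, PySem.Chars.endswith_iff]
  rintro ⟨t, ht⟩
  have h2 := congrArg List.dropLast ht
  simp [List.dropLast_concat] at h2
  apply h
  rw [← h2]
  simp

theorem endswith_bn (xs : List Char) :
    PySem.Chars.endswith (xs ++ ['\\', '\n']) ['\\', '\n'] = true := by
  rw [PySem.Chars.endswith_iff]; exact List.suffix_append _ _

theorem runA_splitlines (cs : List Char) (p : Nat) (mid : Bool) :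
    ∀ (cur : List Char), '\n' ∉ cur → '\r' ∉ cur →
      (cs.head? = some '\n' → cur.head? ≠ some '\\') →
      mid = decide (cur ≠ []) →
      runA (pySplitlinesKeep cs cur) p = cur.reverse ++ altGo cs p mid := by
  induction cs, p, mid using altGo.induct with
  | case1 p mid hm =>
    intro cur hn hr _ hmid
    have hc : cur ≠ [] := by
      intro h; subst h; simp at hmid; simp [hmid] at hm
    have hno : '\n' ∉ cur.reverse := by simpa using hn
    simp only [Bool.and_eq_true, decide_eq_true_eq] at hm
    simp [pySplitlinesKeep, hc, runA, altGo, endswith_no_nl _ hno, hm.1, hm.2]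
  | case2 p mid hm =>
    intro cur hn hr _ hmid
    by_cases hc : cur = []
    · subst hc
      have hf : mid = false := by simpa using hmid
      subst hf
      simp [pySplitlinesKeep, runA, altGo]
    · have hno : '\n' ∉ cur.reverse := by simpa using hn
      rw [hmid] at hm
      simp only [ne_eq, hc, not_false_iff, decide_true, Bool.true_and,
        decide_eq_true_eq, Decidable.not_not] at hm
      simp [pySplitlinesKeep, hc, runA, altGo, endswith_no_nl _ hno, hmid, hm]
  | case3 rest p x ih =>
    intro cur hn hr _ _
    have h1 : pySplitlinesKeep ('\\' :: '\n' :: rest) cur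
        = (cur.reverse ++ ['\\', '\n']) :: pySplitlinesKeep rest [] := by
      simp [pySplitlinesKeep]
    rw [h1, runA, if_pos (endswith_bn _), ih [] (by simp) (by simp) (by simp) (by simp)]
    simp [pyRemovesuffixBN, endswith_bn, altGo]
  | case4 rest p x ih =>
    intro cur hn hr _ _
    rw [show pySplitlinesKeep ('\r' :: '\n' :: rest) cur
        = (cur.reverse ++ ['\r', '\n']) :: pySplitlinesKeep rest [] from by simp [pySplitlinesKeep],
      runA, if_neg (by simp [endswith_rn_false]), ih [] (by simp) (by simp) (by simp) (by simp)]
    simp [altGo]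
  | case5 rest p x hne ih =>
    intro cur hn hr _ _
    have hrw : pySplitlinesKeep ('\r' :: rest) cur
        = (cur.reverse ++ ['\r']) :: pySplitlinesKeep rest [] := by
      match rest with
      | [] => simp [pySplitlinesKeep]
      | c' :: rest' =>
        have : c' ≠ '\n' := fun h => hne rest' (by rw [h])
        simp [pySplitlinesKeep, this]
    have hno : '\n' ∉ cur.reverse ++ ['\r'] := by simpa using hn
    rw [hrw, runA, if_neg (by simp [endswith_no_nl _ hno]),
      ih [] (by simp) (by simp) (by simp) (by simp)]
    have haltGo : altGo ('\r' :: rest) p x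
        = '\r' :: ((if p ≠ 0 then List.replicate p '\n' else []) ++ altGo rest 0 false) := by
      match rest with
      | [] => rfl
      | c' :: rest' =>
        have : c' ≠ '\n' := fun h => hne rest' (by rw [h])
        simp [altGo, this]
    rw [haltGo]; simp
  | case6 rest p x ih =>
    intro cur hn hr hbn _
    have hlast : cur.reverse.getLast? ≠ some '\\' := by
      rw [List.getLast?_reverse]
      exact hbn rfl
    rw [show pySplitlinesKeep ('\n' :: rest) cur
        = (cur.reverse ++ ['\n']) :: pySplitlinesKeep rest [] from by simp [pySplitlinesKeep],
      runA, if_neg (by simp [endswith_nl_false _ hlast]),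
      ih [] (by simp) (by simp) (by simp) (by simp)]
    simp [altGo]
  | case7 c rest p x h1 h2 h3 h4 ih =>
    intro cur hn hr _ _
    have hcn : c ≠ '\n' := fun h => h4 h
    have hcr : c ≠ '\r' := fun h => h3 h
    have hrw : pySplitlinesKeep (c :: rest) cur = pySplitlinesKeep rest (c :: cur) := by
      rw [pySplitlinesKeep.eq_def]
      split <;> simp_all
    have haltGo : altGo (c :: rest) p x = c :: altGo rest p true := by
      rw [altGo.eq_def]
      split <;> simp_all
    have hbn' : rest.head? = some '\n' → (c :: cur).head? ≠ some '\\' := by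
      intro hhead
      cases rest with
      | nil => simp at hhead
      | cons r0 rr =>
        simp only [List.head?] at hhead
        intro hcc
        simp only [List.head?, Option.some.injEq] at hcc
        exact h1 rr hcc (by rw [Option.some.injEq] at hhead; rw [hhead])
    rw [hrw, ih (c :: cur) (by simp only [List.mem_cons, not_or]; exact ⟨Ne.symm hcn, hn⟩)
      (by simp only [List.mem_cons, not_or]; exact ⟨Ne.symm hcr, hr⟩) hbn' (by simp), haltGo]
    simp

-- ===== VERDICT (by name: the statement is the Claim_ definition above) =====
theorem replace_line_continuations_py_spec : Claim_equal_replace_line_continuations_py := by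
  intro source _
  unfold Spec_replace_line_continuations_py replace_line_continuations_py
    replace_line_continuations_py_alt
  simp only [join_nil_eq_flatten, foldA_eq_runA]
  rw [runA_splitlines source.toList 0 false [] (by simp) (by simp) (by simp) (by simp)]
  simp
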